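-- pv_equiv track=rewrite | github.com/SanyaKnyaz/CodeWars | 6 kyu Simple Fun 58 Volleyball Positions.py | volleyball_positions
-- ===== SOURCE A (Python) =====
-- def volleyball_positions(formation, k):
--     if k%6 == 0:
--         return formation
--     for i in range(0, k%6):
--         curr = formation[1][0]
--         formation[1][0] = formation[0][1]
--         formation[0][1] = formation[1][2]
--         formation[1][2] = formation[3][2]
--         formation[3][2] = formation[2][1]
--         formation[2][1] = formation[3][0]
--         formation[3][0] = curr
--     return formation
-- ===== SOURCE B (Python) =====
-- def volleyball_positions(formation, k):
--     r = k % 6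
--     if r == 0:
--         return formation
--     coords = [(1, 0), (0, 1), (1, 2), (3, 2), (2, 1), (3, 0)]
--     vals = [formation[row][col] for row, col in coords]
--     for i, (row, col) in enumerate(coords):
--         formation[row][col] = vals[(i + r) % 6]
--     return formation
-- ===== Notes on version B (the rewrite author's own statement) =====
-- stated objective: simpler
-- what changed: B computes the net rotation offset r = k%6 once and writes each of the six cycle positions directly from a snapshot (new[i] = old[(i+r)%6]), instead of A's loop performing r single-step six-assignment rotations.
import Mathlib
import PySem

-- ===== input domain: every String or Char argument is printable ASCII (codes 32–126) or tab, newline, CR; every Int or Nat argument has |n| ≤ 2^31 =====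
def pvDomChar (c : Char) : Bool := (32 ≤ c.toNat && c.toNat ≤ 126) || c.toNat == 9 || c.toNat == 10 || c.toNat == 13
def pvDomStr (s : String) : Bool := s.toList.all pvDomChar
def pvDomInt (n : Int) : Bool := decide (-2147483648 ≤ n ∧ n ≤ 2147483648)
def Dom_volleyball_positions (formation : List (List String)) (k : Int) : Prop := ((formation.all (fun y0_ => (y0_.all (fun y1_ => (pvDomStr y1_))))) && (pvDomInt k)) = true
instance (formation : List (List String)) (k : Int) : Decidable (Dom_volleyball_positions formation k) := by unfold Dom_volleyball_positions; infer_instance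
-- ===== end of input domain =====

-- B computes the net rotation offset k%6 once and fills the six cycle positions from a
-- snapshot in one pass, instead of A's loop of k%6 single-step rotations (objective: simpler).
-- Both Pythons mutate `formation` in place identically; the equivalence proved here is about
-- the return value.

-- ===== PORT A =====
-- read formation[r][c] (indices are nonnegative literals; Pre_ guarantees in range)
def pvGetRC (f : List (List String)) (r c : Nat) : String := (f.getD r []).getD c ""
-- formation[r][c] = v
def pvSetRC (f : List (List String)) (r c : Nat) (v : String) : List (List String) :=
  f.set r ((f.getD r []).set c v)

-- one iteration of A's for-loop, statement for statement
def pvStepA (f : List (List String)) : List (List String) :=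
  let curr := pvGetRC f 1 0
  let f := pvSetRC f 1 0 (pvGetRC f 0 1)
  let f := pvSetRC f 0 1 (pvGetRC f 1 2)
  let f := pvSetRC f 1 2 (pvGetRC f 3 2)
  let f := pvSetRC f 3 2 (pvGetRC f 2 1)
  let f := pvSetRC f 2 1 (pvGetRC f 3 0)
  pvSetRC f 3 0 curr

def volleyball_positions (formation : List (List String)) (k : Int) : List (List String) :=
  if PySem.Int.mod k 6 = 0 then formation
  else (PySem.List.pyRange 0 (PySem.Int.mod k 6) 1).foldl (fun f _ => pvStepA f) formation

-- ===== PORT B =====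
def volleyball_positions_alt (formation : List (List String)) (k : Int) : List (List String) :=
  let r := (PySem.Int.mod k 6).toNat   -- 0 ≤ k%6 < 6, so toNat is exact
  if r = 0 then formation
  else
    let coords : List (Nat × Nat) := [(1, 0), (0, 1), (1, 2), (3, 2), (2, 1), (3, 0)]
    let vals := coords.map (fun p => pvGetRC formation p.1 p.2)
    (coords.zipIdx).foldl
      (fun f ci => pvSetRC f ci.1.1 ci.1.2 (vals.getD ((ci.2 + r) % 6) "")) formation

-- ===== PRECONDITION & SPEC =====
-- Pre_ excludes exactly the inputs where Python A raises IndexError: k%6 ≠ 0 while the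
-- formation lacks one of the six positions the rotation touches.
def Pre_volleyball_positions (formation : List (List String)) (k : Int) : Prop :=
  PySem.Int.mod k 6 = 0 ∨
    (4 ≤ formation.length ∧
     2 ≤ (formation.getD 0 []).length ∧
     3 ≤ (formation.getD 1 []).length ∧
     2 ≤ (formation.getD 2 []).length ∧
     3 ≤ (formation.getD 3 []).length)
instance (formation : List (List String)) (k : Int) : Decidable (Pre_volleyball_positions formation k) := by unfold Pre_volleyball_positions; infer_instance

def pvWitness_volleyball_positions : List (List String) × Int :=
  ([["a", "b"], ["c", "d", "e"], ["f", "g"], ["h", "i", "j"]], 2)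

def Spec_volleyball_positions (formation : List (List String)) (k : Int) (out : List (List String)) : Prop := out = volleyball_positions_alt formation k
instance (formation : List (List String)) (k : Int) (out : List (List String)) : Decidable (Spec_volleyball_positions formation k out) := by unfold Spec_volleyball_positions; infer_instance

-- ===== CLAIM (what is proved, stated in full; the proofs are below) =====
def Claim_equal_volleyball_positions : Prop := ∀ (formation : List (List String)) (k : Int), Dom_volleyball_positions formation k → Pre_volleyball_positions formation k → Spec_volleyball_positions formation k (volleyball_positions formation k)

-- ===== LEMMAS AND PROOFS =====

-- ===== VERDICT (by name: the statement is the Claim_ definition above) =====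
theorem volleyball_positions_spec : Claim_equal_volleyball_positions := by
  intro f k _dom pre
  show volleyball_positions f k = volleyball_positions_alt f k
  have hnn : 0 ≤ PySem.Int.mod k 6 := PySem.Int.mod_nonneg k (by norm_num)
  have hlt : PySem.Int.mod k 6 < 6 := PySem.Int.mod_lt k (by norm_num)
  by_cases hr0 : PySem.Int.mod k 6 = 0
  · simp only [volleyball_positions, volleyball_positions_alt, hr0]
    simp
  · rcases pre with h | ⟨h1, h2, h3, h4, h5⟩
    · exact absurd h hr0
    · rcases f with _ | ⟨a, _ | ⟨b, _ | ⟨c, _ | ⟨d, rest⟩⟩⟩⟩ <;> simp at h1 <;> try omega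
      simp only [List.getD] at h2 h3 h4 h5
      simp at h2 h3 h4 h5
      rcases a with _ | ⟨a0, _ | ⟨a1, ar⟩⟩ <;> simp at h2 <;> try omega
      rcases b with _ | ⟨b0, _ | ⟨b1, _ | ⟨b2, br⟩⟩⟩ <;> simp at h3 <;> try omega
      rcases c with _ | ⟨c0, _ | ⟨c1, cr⟩⟩ <;> simp at h4 <;> try omega
      rcases d with _ | ⟨d0, _ | ⟨d1, _ | ⟨d2, dr⟩⟩⟩ <;> simp at h5 <;> try omega
      have h6 : PySem.Int.mod k 6 = 1 ∨ PySem.Int.mod k 6 = 2 ∨ PySem.Int.mod k 6 = 3 ∨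
          PySem.Int.mod k 6 = 4 ∨ PySem.Int.mod k 6 = 5 := by omega
      rcases h6 with hr | hr | hr | hr | hr <;>
        · simp only [volleyball_positions, volleyball_positions_alt, hr]
          norm_num [PySem.List.pyRange_one, List.range_succ, pvStepA,
            pvGetRC, pvSetRC, List.zipIdx, List.getD,
            show ((1:Int).toNat) = 1 from rfl, show ((2:Int).toNat) = 2 from rfl,
            show ((3:Int).toNat) = 3 from rfl, show ((4:Int).toNat) = 4 from rfl,
            show ((5:Int).toNat) = 5 from rfl]
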